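-- pv_equiv track=rewrite | github.com/michael-edlin/python-bootcamp | codingnomads/python-101-main/12_user-input-string-formatting/12_10_sarcastic_prompt.py | alternating_caps
-- ===== SOURCE A (Python) =====
-- def alternating_caps(text):
--     # Initialize an empty string to hold the result
--     result = ""
--
--     # Variable to track if we need an uppercase or lowercase letter
--     uppercase = True
--
--     # Loop through each character in the input text
--     for char in text:
--         if char.isalpha():  # Only change case if the character is a letter
--             if uppercase:
--                 result += char.upper()
--             else:
--                 result += char.lower()
--             # Toggle the uppercase flag
--             uppercase = not uppercase
--         else:
--             result += char  # Add the character as it is if it's not a letter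
--
--     return result
-- ===== SOURCE B (Python) =====
-- def alternating_caps(text):
--     letters = [c for c in text if c.isalpha()]
--     cased = [c.upper() if i % 2 == 0 else c.lower() for i, c in enumerate(letters)]
--     it = iter(cased)
--     return "".join(next(it) if c.isalpha() else c for c in text)
-- ===== Notes on version B (the rewrite author's own statement) =====
-- stated objective: alternative
-- what changed: Replaces the single running-toggle loop with a build-then-merge decomposition: collect letters, case them by index parity in one pass, then re-merge with the original text consuming the cased sequence.
import Mathlib
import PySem

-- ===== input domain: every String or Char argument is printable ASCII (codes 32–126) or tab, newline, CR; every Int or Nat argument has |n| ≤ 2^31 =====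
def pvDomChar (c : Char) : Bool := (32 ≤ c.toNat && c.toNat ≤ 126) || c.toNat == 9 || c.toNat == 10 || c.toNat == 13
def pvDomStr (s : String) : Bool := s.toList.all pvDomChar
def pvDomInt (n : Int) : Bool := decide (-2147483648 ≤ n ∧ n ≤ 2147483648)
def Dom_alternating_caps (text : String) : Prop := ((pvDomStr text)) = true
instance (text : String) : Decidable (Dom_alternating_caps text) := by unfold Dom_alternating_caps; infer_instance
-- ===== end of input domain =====

-- B re-implements the running-toggle loop as a build-then-merge decomposition (same cost); return value only, no mutation.

-- ===== PORT A =====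
-- A: one pass with a running `uppercase` toggle, appending to a result string.
def alternating_caps (text : String) : String :=
  (text.toList.foldl (fun (st : String × Bool) char =>
    if PySem.Chars.isalpha char then
      if st.2 then (st.1 ++ String.ofList [PySem.Chars.upperChar char], false)
      else (st.1 ++ String.ofList [PySem.Chars.lowerChar char], true)
    else (st.1 ++ String.ofList [char], st.2)) ("", true)).1

-- ===== PORT B =====
-- letters = [c for c in text if c.isalpha()]; cased by enumerate-index parity
def bCased (letters : List Char) : List Char :=
  (PySem.List.enumerate letters 0).map
    (fun p => if p.1 % 2 == 0 then PySem.Chars.upperChar p.2 else PySem.Chars.lowerChar p.2)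

-- "".join(next(it) if c.isalpha() else c for c in text): consume the cased queue during reconstruction
def bMerge : List Char → List Char → List Char
  | [], _ => []
  | c :: t, q =>
    if PySem.Chars.isalpha c then
      match q with
      | u :: qs => u :: bMerge t qs
      | [] => []          -- iterator exhaustion (never reached: one cased letter per letter)
    else c :: bMerge t q

def alternating_caps_alt (text : String) : String :=
  String.ofList (bMerge text.toList (bCased (text.toList.filter PySem.Chars.isalpha)))

-- ===== PRECONDITION & SPEC =====
def Spec_alternating_caps (text : String) (out : String) : Prop := out = alternating_caps_alt text
instance (text : String) (out : String) : Decidable (Spec_alternating_caps text out) := by unfold Spec_alternating_caps; infer_instance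

-- ===== CLAIM (what is proved, stated in full; the proofs are below) =====
def Claim_equal_alternating_caps : Prop := ∀ (text : String), Dom_alternating_caps text → Spec_alternating_caps text (alternating_caps text)

-- ===== LEMMAS AND PROOFS =====

-- reference: A's emitted characters as a list, given the current toggle
def goA : List Char → Bool → List Char
  | [], _ => []
  | c :: t, u =>
    if PySem.Chars.isalpha c then
      (if u then PySem.Chars.upperChar c else PySem.Chars.lowerChar c) :: goA t (!u)
    else c :: goA t u

-- toggle-flavoured casing of a letter list
def casList : List Char → Bool → List Char
  | [], _ => []
  | c :: t, u =>
    (if u then PySem.Chars.upperChar c else PySem.Chars.lowerChar c) :: casList t (!u)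

theorem mk_append (a b : List Char) : String.ofList a ++ String.ofList b = String.ofList (a ++ b) := by
  apply String.toList_injective; simp

theorem foldlA_eq (t : List Char) : ∀ (s : String) (u : Bool),
    (t.foldl (fun (st : String × Bool) char =>
      if PySem.Chars.isalpha char then
        if st.2 then (st.1 ++ String.ofList [PySem.Chars.upperChar char], false)
        else (st.1 ++ String.ofList [PySem.Chars.lowerChar char], true)
      else (st.1 ++ String.ofList [char], st.2)) (s, u)).1 = s ++ String.ofList (goA t u) := by
  induction t with
  | nil => intro s u; simp [goA]
  | cons c t ih =>
    intro s u
    by_cases h : PySem.Chars.isalpha c = true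
    · cases u <;>
        simp [List.foldl, h, ih, goA, String.append_assoc, mk_append]
    · simp [List.foldl, h, ih, goA, String.append_assoc, mk_append]

theorem cased_eq (l : List Char) : ∀ (s : Int), 0 ≤ s →
    (PySem.List.enumerate l s).map
      (fun p => if p.1 % 2 == 0 then PySem.Chars.upperChar p.2 else PySem.Chars.lowerChar p.2)
      = casList l (s % 2 == 0) := by
  induction l with
  | nil => intro s _; simp [PySem.List.enumerate_nil, casList]
  | cons c t ih =>
    intro s hs
    rw [PySem.List.enumerate_cons, List.map_cons, ih (s + 1) (by omega), casList]
    have hpar : ((s + 1) % 2 == 0) = !(s % 2 == 0) := by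
      rcases Int.emod_two_eq_zero_or_one s with h | h <;> simp [Int.add_emod, h]
    rw [hpar]

theorem merge_eq (t : List Char) : ∀ (u : Bool),
    bMerge t (casList (t.filter PySem.Chars.isalpha) u) = goA t u := by
  induction t with
  | nil => intro u; simp [bMerge, goA]
  | cons c t ih =>
    intro u
    by_cases h : PySem.Chars.isalpha c = true
    · simp [h, casList, bMerge, ih, goA]
    · simp [h, bMerge, ih, goA]

-- ===== VERDICT (by name: the statement is the Claim_ definition above) =====
theorem alternating_caps_spec : Claim_equal_alternating_caps := by
  intro text _
  show alternating_caps text = alternating_caps_alt text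
  rw [alternating_caps, alternating_caps_alt, foldlA_eq, bCased,
    cased_eq _ 0 le_rfl]
  have : ((0 : Int) % 2 == 0) = true := by decide
  rw [this, merge_eq]
  rfl
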